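-- pv_equiv track=rewrite | github.com/hjn5018/sparta_github | codekata_programmers/특별한_이차원_배열_2.py | solution
-- ===== SOURCE A (Python) =====
-- def solution(arr):
--     str_ = ''
--     for i in range(len(arr)):
--         for j in range(len(arr)):
--             if arr[i][j] == arr[j][i]:
--                 str_ += '1'
--             else:
--                 str_ += '0'
--     if '0' in str_:
--         return 0
--     else:
--         return 1
-- ===== SOURCE B (Python) =====
-- def solution(arr):
--     n = len(arr)
--     return int(all(arr[i][j] == arr[j][i] for i in range(n) for j in range(i + 1, n)))
-- ===== Notes on version B (the rewrite author's own statement) =====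
-- stated objective: simpler
-- what changed: B replaces A's accumulation of a '1'/'0' character per ordered pair followed by a substring scan with a single short-circuiting all() over the strict upper triangle only (j > i), returning int(...) directly; half the comparisons, no string building, early exit.
import Mathlib
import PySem

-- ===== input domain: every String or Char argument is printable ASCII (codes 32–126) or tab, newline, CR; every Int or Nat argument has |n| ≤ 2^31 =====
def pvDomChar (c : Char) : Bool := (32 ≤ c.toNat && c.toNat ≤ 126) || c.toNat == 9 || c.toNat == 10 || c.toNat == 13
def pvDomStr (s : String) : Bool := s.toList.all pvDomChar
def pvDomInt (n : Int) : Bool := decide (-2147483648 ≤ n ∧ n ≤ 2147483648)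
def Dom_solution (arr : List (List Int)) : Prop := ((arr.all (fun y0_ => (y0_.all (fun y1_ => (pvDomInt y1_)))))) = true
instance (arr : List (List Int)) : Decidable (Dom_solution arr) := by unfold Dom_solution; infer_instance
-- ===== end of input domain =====

-- B checks only the strict upper triangle with an early-exit all() instead of building a '1'/'0' string
-- over every ordered pair and scanning it for '0'; equal results on all square-enough inputs (Pre_).

-- arr[i][j] for 0 ≤ i, j < len(arr); exact under Pre_solution (indices always in range there)
def pvAget (arr : List (List Int)) (i j : Nat) : Int := (arr.getD i []).getD j 0

-- ===== PORT A =====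
-- the Python string str_ is modeled as a List Char built in the same order
def solution (arr : List (List Int)) : Int :=
  let n := arr.length
  let str_ : List Char := (List.range n).foldl (fun s i =>
      (List.range n).foldl (fun s j =>
        s ++ [if pvAget arr i j = pvAget arr j i then '1' else '0']) s) []
  if str_.contains '0' then 0 else 1

-- ===== PORT B =====
def solution_alt (arr : List (List Int)) : Int :=
  let n := arr.length
  if (List.range n).all (fun i =>
      (List.range' (i + 1) (n - (i + 1))).all (fun j =>
        pvAget arr i j == pvAget arr j i)) then 1 else 0

-- ===== PRECONDITION & SPEC =====
-- Pre_ admits exactly the inputs where Python A returns: every row must have at least len(arr)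
-- entries, otherwise arr[i][j] raises IndexError in A.
def Pre_solution (arr : List (List Int)) : Prop := ∀ row ∈ arr, arr.length ≤ row.length
instance (arr : List (List Int)) : Decidable (Pre_solution arr) := by unfold Pre_solution; infer_instance
def pvWitness_solution : List (List Int) := [[1, 2], [2, 3]]
def Spec_solution (arr : List (List Int)) (out : Int) : Prop := out = solution_alt arr
instance (arr : List (List Int)) (out : Int) : Decidable (Spec_solution arr out) := by unfold Spec_solution; infer_instance

-- ===== CLAIM (what is proved, stated in full; the proofs are below) =====
def Claim_equal_solution : Prop := ∀ (arr : List (List Int)), Dom_solution arr → Pre_solution arr → Spec_solution arr (solution arr)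

-- ===== LEMMAS AND PROOFS =====

-- A's scan finds a '0' iff some ordered pair disagrees
theorem pv_contains_zero (arr : List (List Int)) (n : Nat) :
    ((List.range n).flatMap (fun i => (List.range n).map
      (fun j => if pvAget arr i j = pvAget arr j i then '1' else '0'))).contains '0' = true ↔
    ∃ i < n, ∃ j < n, pvAget arr i j ≠ pvAget arr j i := by
  simp only [List.contains_iff_exists_mem_beq, List.mem_flatMap, List.mem_map, List.mem_range]
  constructor
  · rintro ⟨c, ⟨i, hi, j, hj, hc⟩, hb⟩
    refine ⟨i, hi, j, hj, ?_⟩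
    intro h
    rw [if_pos h] at hc
    subst hc
    simp at hb
  · rintro ⟨i, hi, j, hj, h⟩
    exact ⟨'0', ⟨i, hi, j, hj, by rw [if_neg h]⟩, by simp⟩

-- B's triangle test succeeds iff every strict-upper pair agrees
theorem pv_triangle (arr : List (List Int)) (n : Nat) :
    ((List.range n).all (fun i =>
      (List.range' (i + 1) (n - (i + 1))).all (fun j =>
        pvAget arr i j == pvAget arr j i))) = true ↔
    ∀ i < n, ∀ j, i < j → j < n → pvAget arr i j = pvAget arr j i := by
  simp only [List.all_eq_true, List.mem_range, List.mem_range', beq_iff_eq]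
  constructor
  · intro h i hi j hij hjn
    exact h i hi j ⟨j - (i + 1), by omega, by omega⟩
  · rintro h i hi j ⟨k, hk, rfl⟩
    simpa using h i hi (i + 1 + k) (by omega) (by omega)

-- full square agreement reduces to the strict upper triangle
theorem pv_square_iff_triangle (arr : List (List Int)) (n : Nat) :
    (∀ i < n, ∀ j < n, pvAget arr i j = pvAget arr j i) ↔
    (∀ i < n, ∀ j, i < j → j < n → pvAget arr i j = pvAget arr j i) := by
  constructor
  · intro h i hi j _ hj; exact h i hi j hj
  · intro h i hi j hj
    rcases Nat.lt_trichotomy i j with hlt | heq | hgt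
    · exact h i hi j hlt hj
    · rw [heq]
    · exact (h j hj i hgt hi).symm

-- ===== VERDICT (by name: the statement is the Claim_ definition above) =====
theorem solution_spec : Claim_equal_solution := by
  intro arr _ _
  unfold Spec_solution solution solution_alt
  simp only [PySem.List.foldl_append_singleton_eq_map, PySem.List.foldl_append_eq_flatMap,
    List.nil_append]
  set n := arr.length
  by_cases h : ∀ i < n, ∀ j < n, pvAget arr i j = pvAget arr j i
  · rw [if_neg, if_pos]
    · exact (pv_triangle arr n).mpr ((pv_square_iff_triangle arr n).mp h)
    · intro hc
      obtain ⟨i, hi, j, hj, hne⟩ := (pv_contains_zero arr n).mp hc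
      exact hne (h i hi j hj)
  · rw [if_pos, if_neg]
    · intro ht
      exact h fun i hi j hj => ((pv_square_iff_triangle arr n).mpr ((pv_triangle arr n).mp ht)) i hi j hj
    · apply (pv_contains_zero arr n).mpr
      push Not at h
      obtain ⟨i, hi, j, hj, hne⟩ := h
      exact ⟨i, hi, j, hj, hne⟩
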